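-- pv_equiv track=rewrite | github.com/OptimisticReservoir/math_problems | arrow_graphs/functions.py | best_byte_size
-- ===== SOURCE A (Python) =====
-- def best_byte_size(mod):
--     min_mod = float("inf") # set to infinitely large
--     best = []
--     MIN_READ = 4
--     MAX_READ = 128 # max bytes to read at once.
--     BYTE_VALUE = 256 # bytes are base 256
--     for x in range(MIN_READ,MAX_READ+1):
--         n = BYTE_VALUE**x % mod
--         if n < min_mod:
--             min_mod = n
--             best = [x]
--         elif n == min_mod:
--             best.append(x)
--     return best
-- ===== SOURCE B (Python) =====
-- def best_byte_size(mod):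
--     pairs = [(256 ** x % mod, x) for x in range(4, 129)]
--     m = min(v for v, _ in pairs)
--     return [x for v, x in pairs if v == m]
-- ===== Notes on version B (the rewrite author's own statement) =====
-- stated objective: simpler
-- what changed: Replaces A's single-pass running-minimum loop with tie accumulation by a build-table (value,x pairs) / min / filter decomposition.
import Mathlib
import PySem

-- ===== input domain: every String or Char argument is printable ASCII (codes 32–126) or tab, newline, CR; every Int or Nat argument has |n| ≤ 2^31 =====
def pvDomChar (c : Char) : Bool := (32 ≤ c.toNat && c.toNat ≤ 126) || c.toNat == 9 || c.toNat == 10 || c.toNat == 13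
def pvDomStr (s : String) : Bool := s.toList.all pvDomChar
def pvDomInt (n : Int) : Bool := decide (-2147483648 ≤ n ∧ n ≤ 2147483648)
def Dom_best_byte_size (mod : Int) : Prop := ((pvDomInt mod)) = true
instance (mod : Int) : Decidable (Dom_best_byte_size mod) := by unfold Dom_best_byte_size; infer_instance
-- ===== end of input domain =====

-- B replaces A's running-minimum-with-tie-accumulation loop by a build-table / min / filter decomposition (same cost; simpler).


-- ===== PORT A =====
-- n = 256**x % mod; x ranges over 4..128 so x.toNat is exact for the nonnegative exponent
def aVal (mod x : Int) : Int := PySem.Int.mod (256 ^ x.toNat) mod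

-- one iteration of A's loop; min_mod = none encodes float("inf") (before the first iteration)
def aStep (mod : Int) (st : Option Int × List Int) (x : Int) : Option Int × List Int :=
  let n := aVal mod x
  match st with
  | (none, _) => (some n, [x])
  | (some m, best) =>
    if n < m then (some n, [x])
    else if n = m then (some m, best ++ [x])
    else (some m, best)

def best_byte_size (mod : Int) : List Int :=
  ((PySem.List.pyRange 4 129 1).foldl (aStep mod) (none, [])).2

-- ===== PORT B =====
def best_byte_size_alt (mod : Int) : List Int :=
  let pairs := (PySem.List.pyRange 4 129 1).map (fun x => (PySem.Int.mod (256 ^ x.toNat) mod, x))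
  match PySem.List.min? (pairs.map (·.1)) (fun v => v) with
  | none => []   -- unreachable: the range 4..128 is nonempty
  | some m => (pairs.filter (fun p => p.1 == m)).map (·.2)

-- ===== PRECONDITION & SPEC =====
-- mod = 0 makes A (and B) raise ZeroDivisionError on 256**x % mod
def Pre_best_byte_size (mod : Int) : Prop := mod ≠ 0
instance (mod : Int) : Decidable (Pre_best_byte_size mod) := by unfold Pre_best_byte_size; infer_instance
def pvWitness_best_byte_size : Int := (7)

def Spec_best_byte_size (mod : Int) (out : List Int) : Prop := out = best_byte_size_alt mod
instance (mod : Int) (out : List Int) : Decidable (Spec_best_byte_size mod out) := by unfold Spec_best_byte_size; infer_instance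

-- ===== CLAIM (what is proved, stated in full; the proofs are below) =====
def Claim_equal_best_byte_size : Prop := ∀ (mod : Int), Dom_best_byte_size mod → Pre_best_byte_size mod → Spec_best_byte_size mod (best_byte_size mod)

-- ===== LEMMAS AND PROOFS =====

-- running min of (f applied to) a list, seeded with m
def runMin (f : Int → Int) (m : Int) (l : List Int) : Int :=
  l.foldl (fun acc x => min acc (f x)) m

theorem runMin_le_seed (f : Int → Int) (m : Int) (l : List Int) : runMin f m l ≤ m := by
  induction l generalizing m with
  | nil => simp [runMin]
  | cons a t ih =>
    have := ih (min m (f a))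
    simp only [runMin, List.foldl_cons] at *
    exact le_trans this (min_le_left _ _)

-- A's fold from an arbitrary state (some m, best) computes the running min and
-- "(keep best iff m stays minimal) ++ the elements achieving the overall min"
theorem aFold_char (mod : Int) (l : List Int) : ∀ (m : Int) (best : List Int),
    l.foldl (aStep mod) (some m, best)
      = (some (runMin (aVal mod) m l),
         (if runMin (aVal mod) m l = m then best else [])
           ++ l.filter (fun x => aVal mod x == runMin (aVal mod) m l)) := by
  induction l with
  | nil => intro m best; simp [runMin]
  | cons a t ih =>
    intro m best
    have hM : runMin (aVal mod) m (a :: t) = runMin (aVal mod) (min m (aVal mod a)) t := by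
      simp [runMin]
    rw [List.foldl_cons, List.filter_cons, hM]
    by_cases h1 : aVal mod a < m
    · have hmin : min m (aVal mod a) = aVal mod a := by omega
      rw [show aStep mod (some m, best) a = (some (aVal mod a), [a]) by
            simp [aStep, h1], ih (aVal mod a) [a], hmin]
      have hle : runMin (aVal mod) (aVal mod a) t ≤ aVal mod a := runMin_le_seed _ _ _
      have hne : runMin (aVal mod) (aVal mod a) t ≠ m := by omega
      by_cases h2 : runMin (aVal mod) (aVal mod a) t = aVal mod a
      · simp [h2]; intro h; omega
      · have hb : ¬ (aVal mod a == runMin (aVal mod) (aVal mod a) t) = true := by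
          simp; omega
        simp [hne, h2, hb]
    · have hmin : min m (aVal mod a) = m := by omega
      rw [hmin]
      have hle : runMin (aVal mod) m t ≤ m := runMin_le_seed _ _ _
      by_cases h2 : aVal mod a = m
      · rw [show aStep mod (some m, best) a = (some m, best ++ [a]) by
              simp [aStep, h2], ih m (best ++ [a])]
        by_cases h3 : runMin (aVal mod) m t = m
        · simp [h3, h2, List.append_assoc]
        · have hb : ¬ (aVal mod a == runMin (aVal mod) m t) = true := by
            simp [h2]; omega
          simp [h3, hb]
      · rw [show aStep mod (some m, best) a = (some m, best) by
              simp [aStep, h1, h2], ih m best]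
        have hb : ¬ (aVal mod a == runMin (aVal mod) m t) = true := by
          simp; omega
        simp [hb]

theorem filter_pairs (mod m : Int) (l : List Int) :
    ((l.map (fun x => (PySem.Int.mod (256 ^ x.toNat) mod, x))).filter
        (fun p => p.1 == m)).map (fun p => p.2)
      = l.filter (fun x => aVal mod x == m) := by
  induction l with
  | nil => rfl
  | cons a t ih =>
    simp only [List.map_cons, List.filter_cons]
    by_cases h : PySem.Int.mod (256 ^ a.toNat) mod = m
    · simp [aVal, h, ih]
    · simp [aVal, h, ih]

-- ===== VERDICT (by name: the statement is the Claim_ definition above) =====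
theorem best_byte_size_spec : Claim_equal_best_byte_size := by
  intro mod _ _
  unfold Spec_best_byte_size best_byte_size best_byte_size_alt
  have hcons : PySem.List.pyRange 4 129 1 = 4 :: PySem.List.pyRange 5 129 1 :=
    PySem.List.pyRange_one_cons (by norm_num)
  rw [hcons]
  set t := PySem.List.pyRange 5 129 1 with ht
  rw [List.foldl_cons,
      show aStep mod (none, ([] : List Int)) 4 = (some (aVal mod 4), [4]) from rfl,
      aFold_char mod t (aVal mod 4) [4]]
  simp only [List.map_cons, List.map_map, PySem.List.min?_id_cons]
  have hmin : List.foldl min (PySem.Int.mod (256 ^ (4:Int).toNat) mod)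
      (List.map ((fun p => p.1) ∘ fun x => (PySem.Int.mod (256 ^ x.toNat) mod, x)) t)
      = runMin (aVal mod) (aVal mod 4) t := by
    simp [runMin, aVal, List.foldl_map, Function.comp]
  rw [hmin,
      show ((PySem.Int.mod (256 ^ (4:Int).toNat) mod, (4:Int))
              :: List.map (fun x => (PySem.Int.mod (256 ^ x.toNat) mod, x)) t)
            = List.map (fun x => (PySem.Int.mod (256 ^ x.toNat) mod, x)) (4 :: t) from rfl,
      filter_pairs, List.filter_cons]
  have hle : runMin (aVal mod) (aVal mod 4) t ≤ aVal mod 4 := runMin_le_seed _ _ _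
  by_cases h : runMin (aVal mod) (aVal mod 4) t = aVal mod 4
  · simp [h]
  · have hb : ¬ (aVal mod 4 == runMin (aVal mod) (aVal mod 4) t) = true := by
      simp; omega
    simp [h, hb]
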